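-- pv_equiv track=rewrite | github.com/Kaellas/Factoradic | Factoradic.py | decimal_to_factoradic
-- ===== SOURCE A (Python) =====
-- def decimal_to_factoradic(decimal):
--
--   if decimal == 0:
--     return "0"
--
--   rem = ""
--   n = len(str(abs(decimal)))
--   i = 2
--
--   while decimal > 0:
--     rem = str(decimal % i) + rem
--     decimal = decimal // i
--     i += 1
--
--   return rem
-- ===== SOURCE B (Python) =====
-- def decimal_to_factoradic(decimal):
--     if decimal == 0:
--         return "0"
--     if decimal < 0:
--         return ""  # matches A: no digits are produced for negative input
--     # factorial place values, largest first: [k!, ..., 2!, 1!] with k! <= decimal < (k+1)!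
--     weights = [1]
--     f, i = 1, 1
--     while f * (i + 1) <= decimal:
--         i += 1
--         f *= i
--         weights.insert(0, f)
--     # most-significant digit first: digit = decimal // place, then reduce
--     digits = []
--     for w in weights:
--         digits.append(str(decimal // w))
--         decimal %= w
--     return "".join(digits)
-- ===== Notes on version B (the rewrite author's own statement) =====
-- stated objective: alternative
-- what changed: B precomputes the factorial place-value table and emits digits most-significant-first by repeated div/mod against the table, instead of A's ascending-modulus least-significant-first loop that prepends each digit.
import Mathlib
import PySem

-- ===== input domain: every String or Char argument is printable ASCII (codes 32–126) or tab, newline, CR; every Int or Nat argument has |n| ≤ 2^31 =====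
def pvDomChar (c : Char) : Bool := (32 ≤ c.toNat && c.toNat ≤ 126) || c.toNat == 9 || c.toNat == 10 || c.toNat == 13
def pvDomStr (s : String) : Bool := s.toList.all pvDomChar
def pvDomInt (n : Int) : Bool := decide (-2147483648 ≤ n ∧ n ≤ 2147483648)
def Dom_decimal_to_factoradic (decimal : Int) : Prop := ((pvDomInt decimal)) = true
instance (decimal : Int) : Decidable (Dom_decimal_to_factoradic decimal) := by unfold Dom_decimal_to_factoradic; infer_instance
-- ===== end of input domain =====

-- B builds the factorial place-value table first and emits digits most-significant-first
-- (div/mod by each place value), instead of A's ascending-modulus least-significant-first loop.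

-- ===== PORT A =====
-- A's while loop: divisor i = k + 2 (i starts at 2; k counts iterations so termination is on decimal)
def aLoop (d : Int) (k : Nat) (rem : String) : String :=
  if h : 0 < d then
    aLoop (PySem.Int.floordiv d ((k + 2 : Nat) : Int)) (k + 1)
      (PySem.Int.toStr (PySem.Int.mod d ((k + 2 : Nat) : Int)) ++ rem)
  else rem
termination_by d.toNat
decreasing_by
  have hc : (0:Int) < ((k + 2 : Nat) : Int) := by exact_mod_cast Nat.succ_pos (k+1)
  rw [PySem.Int.floordiv_eq_ediv_of_pos hc]
  have hlt : d / ((k + 2 : Nat) : Int) < d := by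
    rw [Int.ediv_lt_iff_lt_mul hc]
    have h1 : d * 1 < d * ((k + 2 : Nat) : Int) := by
      apply mul_lt_mul_of_pos_left _ h
      push_cast; omega
    omega
  omega

def decimal_to_factoradic (decimal : Int) : String :=
  if decimal == 0 then "0"
  else
    -- n = len(str(abs(decimal))) is computed by A and never used
    let _n := PySem.Str.len (PySem.Int.toStr |decimal|)
    aLoop decimal 0 ""

-- ===== PORT B =====
-- while f * (i + 1) <= decimal: i += 1; f *= i; weights.insert(0, f)
-- (f, i carry proofs 1 ≤ f, 1 ≤ i only for termination; the computation is Source B's)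
def bBuild (d : Int) (ws : List Int) (f i : Nat) (hf : 1 ≤ f) (hi : 1 ≤ i) : List Int :=
  if h : ((f * (i + 1) : Nat) : Int) ≤ d then
    bBuild d (((f * (i + 1) : Nat) : Int) :: ws) (f * (i + 1)) (i + 1)
      (Nat.le_trans hf (Nat.le_mul_of_pos_right f (by omega))) (by omega)
  else ws
termination_by d.toNat - f
decreasing_by
  have h1 : f * (i + 1) ≤ d.toNat := by
    have h0 : (0:Int) ≤ d := le_trans (by positivity) h
    omega
  have h2 : f + 1 ≤ f * (i + 1) :=
    calc f + 1 ≤ f * 2 := by omega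
    _ ≤ f * (i + 1) := Nat.mul_le_mul_left f (by omega)
  omega

-- for w in weights: digits.append(str(decimal // w)); decimal %= w   — then "".join(digits)
def bDigits (ws : List Int) (cur : Int) : String :=
  match ws with
  | [] => ""
  | w :: rest => PySem.Int.toStr (PySem.Int.floordiv cur w) ++ bDigits rest (PySem.Int.mod cur w)

def decimal_to_factoradic_alt (decimal : Int) : String :=
  if decimal == 0 then "0"
  else if decimal < 0 then ""
  else bDigits (bBuild decimal [((1 : Nat) : Int)] 1 1 (le_refl 1) (le_refl 1)) decimal

-- ===== PRECONDITION & SPEC =====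
def Spec_decimal_to_factoradic (decimal : Int) (out : String) : Prop := out = decimal_to_factoradic_alt decimal
instance (decimal : Int) (out : String) : Decidable (Spec_decimal_to_factoradic decimal out) := by unfold Spec_decimal_to_factoradic; infer_instance

-- ===== CLAIM (what is proved, stated in full; the proofs are below) =====
def Claim_equal_decimal_to_factoradic : Prop := ∀ (decimal : Int), Dom_decimal_to_factoradic decimal → Spec_decimal_to_factoradic decimal (decimal_to_factoradic decimal)

-- ===== LEMMAS AND PROOFS =====

-- sprodN k m = (k+2)(k+3)⋯(k+m+1): the product of m consecutive divisors starting at k+2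
def sprodN : Nat → Nat → Nat
  | _, 0 => 1
  | k, (m+1) => (k + 2) * sprodN (k + 1) m

-- factL m = [m!, (m-1)!, …, 1!] as Ints
def factL : Nat → List Int
  | 0 => []
  | (m+1) => ((Nat.factorial (m+1) : Nat) : Int) :: factL m

-- desc i j = [(i+j)!, …, (i+1)!] as Ints
def desc (i : Nat) : Nat → List Int
  | 0 => []
  | (j+1) => ((Nat.factorial (i + j + 1) : Nat) : Int) :: desc i j

-- padded little-endian digit string: m digits of d with divisors k+2, k+3, …
def padL : Nat → Nat → Nat → String
  | 0, _, _ => ""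
  | (m+1), d, k => padL m (d / (k + 2)) (k + 1) ++ PySem.Int.toStr ((d % (k + 2) : Nat) : Int)

-- padded big-endian digit string: m digits of d, top place value sprodN k (m-1)
def padU : Nat → Nat → Nat → String
  | _, 0, _ => ""
  | k, (m+1), d => PySem.Int.toStr ((d / sprodN k m : Nat) : Int) ++ padU k m (d % sprodN k m)

lemma sprodN_pos (k m : Nat) : 0 < sprodN k m := by
  induction m generalizing k with
  | zero => simp [sprodN]
  | succ m ih =>
    show 0 < (k + 2) * sprodN (k + 1) m
    exact Nat.mul_pos (by omega) (ih (k+1))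

lemma sprodN_tail (k m : Nat) : sprodN k (m+1) = sprodN k m * (k + m + 2) := by
  induction m generalizing k with
  | zero => simp [sprodN]
  | succ m ih =>
    show (k + 2) * sprodN (k + 1) (m + 1) = (k + 2) * sprodN (k + 1) m * (k + m + 3)
    rw [ih (k+1)]; ring_nf

lemma sprodN_zero_eq (m : Nat) : sprodN 0 m = Nat.factorial (m + 1) := by
  induction m with
  | zero => simp [sprodN, Nat.factorial]
  | succ m ih =>
    rw [sprodN_tail, ih]
    have e : Nat.factorial (m + 1 + 1) = (m + 2) * Nat.factorial (m + 1) := Nat.factorial_succ (m + 1)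
    rw [e]
    ring

-- peel the bottom digit off a big-endian padded string
lemma padU_peel (m : Nat) : ∀ k d, d < sprodN k (m+1) →
    padU (k+1) m (d / (k+2)) ++ PySem.Int.toStr ((d % (k+2) : Nat) : Int) = padU k (m+1) d := by
  induction m with
  | zero =>
    intro k d hd
    have hd' : d < k + 2 := by simpa [sprodN] using hd
    simp [padU, sprodN, Nat.mod_eq_of_lt hd']
  | succ m ih =>
    intro k d hd
    have hS : sprodN k (m+2) = (k+2) * sprodN (k+1) (m+1) := rfl
    have hdvd : (k+2) ∣ sprodN k (m+1) := ⟨sprodN (k+1) m, rfl⟩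
    have e1 : d / (k+2) / sprodN (k+1) m = d / sprodN k (m+1) := by
      rw [Nat.div_div_eq_div_mul]; rfl
    have e2 : d / (k+2) % sprodN (k+1) m = d % sprodN k (m+1) / (k+2) := by
      rw [← Nat.mod_mul_right_div_self]; rfl
    have e3 : d % (k+2) = d % sprodN k (m+1) % (k+2) := (Nat.mod_mod_of_dvd d hdvd).symm
    show PySem.Int.toStr ((d / (k+2) / sprodN (k+1) m : Nat) : Int) ++
        padU (k+1) m (d / (k+2) % sprodN (k+1) m) ++ PySem.Int.toStr ((d % (k+2) : Nat) : Int) =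
        PySem.Int.toStr ((d / sprodN k (m+1) : Nat) : Int) ++ padU k (m+1) (d % sprodN k (m+1))
    rw [e1, e2, e3, String.append_assoc]
    congr 1
    exact ih k (d % sprodN k (m+1)) (Nat.mod_lt d (sprodN_pos k (m+1)))

-- padded little-endian equals padded big-endian
lemma padL_eq_padU (m : Nat) : ∀ k d, d < sprodN k m → padL m d k = padU k m d := by
  induction m with
  | zero => intro k d _; rfl
  | succ m ih =>
    intro k d hd
    have hq : d / (k+2) < sprodN (k+1) m := by
      rw [Nat.div_lt_iff_lt_mul (by omega)]
      calc d < sprodN k (m+1) := hd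
      _ = sprodN (k+1) m * (k+2) := by rw [show sprodN k (m+1) = (k+2) * sprodN (k+1) m from rfl]; ring
    show padL m (d / (k + 2)) (k + 1) ++ _ = _
    rw [ih (k+1) _ hq]
    exact padU_peel m k d hd

-- A's loop computes the padded little-endian string when the digit count is exact
lemma aLoop_eq_padL (m : Nat) : ∀ k (d : Nat) rem, sprodN k m ≤ d → d < sprodN k (m+1) →
    aLoop (d : Int) k rem = padL (m+1) d k ++ rem := by
  induction m with
  | zero =>
    intro k d rem hlo hhi
    have h1 : 1 ≤ d := by simpa [sprodN] using hlo
    have h2 : d < k + 2 := by simpa [sprodN] using hhi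
    rw [aLoop]
    simp only [dif_pos (by exact_mod_cast h1 : (0:Int) < (d:Int))]
    rw [PySem.Int.floordiv_natCast, PySem.Int.mod_natCast]
    rw [Nat.div_eq_of_lt h2]
    rw [aLoop]
    simp [padL, Nat.mod_eq_of_lt h2]
  | succ m ih =>
    intro k d rem hlo hhi
    have hpos : 0 < d := lt_of_lt_of_le (sprodN_pos k (m+1)) hlo
    rw [aLoop]
    simp only [dif_pos (by exact_mod_cast hpos : (0:Int) < (d:Int))]
    rw [PySem.Int.floordiv_natCast, PySem.Int.mod_natCast]
    have hlo' : sprodN (k+1) m ≤ d / (k+2) := by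
      rw [Nat.le_div_iff_mul_le (by omega)]
      calc sprodN (k+1) m * (k+2) = sprodN k (m+1) := by
            rw [show sprodN k (m+1) = (k+2) * sprodN (k+1) m from rfl]; ring
      _ ≤ d := hlo
    have hhi' : d / (k+2) < sprodN (k+1) (m+1) := by
      rw [Nat.div_lt_iff_lt_mul (by omega)]
      calc d < sprodN k (m+2) := hhi
      _ = sprodN (k+1) (m+1) * (k+2) := by
            rw [show sprodN k (m+2) = (k+2) * sprodN (k+1) (m+1) from rfl]; ring
    rw [ih (k+1) (d / (k+2)) _ hlo' hhi']
    show _ = (padL (m+1) (d / (k+2)) (k+1) ++ PySem.Int.toStr ((d % (k+2) : Nat) : Int)) ++ rem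
    rw [String.append_assoc]

-- desc shifted down absorbs the next factorial
lemma desc_absorb (i : Nat) : ∀ j, desc (i+1) j ++ [((Nat.factorial (i+1) : Nat) : Int)] = desc i (j+1) := by
  intro j
  induction j with
  | zero => simp [desc]
  | succ j ih =>
    show ((Nat.factorial (i + 1 + j + 1) : Nat) : Int) :: (desc (i+1) j ++ _) = _
    rw [ih, show i + 1 + j + 1 = i + (j + 1) + 1 from by omega]
    rfl

lemma desc_one_append (j : Nat) : desc 1 j ++ [((1 : Nat) : Int)] = factL (j+1) := by
  induction j with
  | zero => simp [desc, factL, Nat.factorial]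
  | succ j ih =>
    show ((Nat.factorial (1 + j + 1) : Nat) : Int) :: (desc 1 j ++ _) = _
    rw [ih, show 1 + j + 1 = j + 2 from by omega]
    rfl

-- bBuild finds the exact top place: result is the descending factorial list and k!≤d<(k+1)!
lemma bBuild_spec (d : Int) : ∀ (fuel : Nat) (f i : Nat) (hf : 1 ≤ f) (hi : 1 ≤ i) (ws : List Int),
    d.toNat - f ≤ fuel → f = Nat.factorial i → ((f : Nat) : Int) ≤ d →
    ∃ j, bBuild d ws f i hf hi = desc i j ++ ws ∧
      ((Nat.factorial (i + j) : Nat) : Int) ≤ d ∧ d < ((Nat.factorial (i + j + 1) : Nat) : Int) := by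
  intro fuel
  induction fuel with
  | zero =>
    intro f i hf hi ws hfuel hfac hle
    have h2 : f + 1 ≤ f * (i + 1) :=
      calc f + 1 ≤ f * 2 := by omega
      _ ≤ f * (i + 1) := Nat.mul_le_mul_left f (by omega)
    have hnot : ¬ ((f * (i + 1) : Nat) : Int) ≤ d := by
      intro h
      have h0 : (0:Int) ≤ d := le_trans (by positivity) h
      have h1 : f * (i + 1) ≤ d.toNat := by omega
      omega
    rw [bBuild, dif_neg hnot]
    refine ⟨0, by simp [desc], by simpa [hfac] using hle, ?_⟩
    have e : Nat.factorial (i + 0 + 1) = f * (i + 1) := by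
      rw [hfac, Nat.factorial_succ]; ring_nf
    rw [e]
    omega
  | succ fuel ihf =>
    intro f i hf hi ws hfuel hfac hle
    rw [bBuild]
    by_cases h : ((f * (i + 1) : Nat) : Int) ≤ d
    · rw [dif_pos h]
      have hfac' : f * (i + 1) = Nat.factorial (i + 1) := by
        rw [hfac, Nat.factorial_succ]; ring
      have hfuel' : d.toNat - f * (i+1) ≤ fuel := by
        have h1 : f * (i + 1) ≤ d.toNat := by
          have h0 : (0:Int) ≤ d := le_trans (by positivity) h
          omega
        have h2 : f + 1 ≤ f * (i + 1) :=
          calc f + 1 ≤ f * 2 := by omega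
          _ ≤ f * (i + 1) := Nat.mul_le_mul_left f (by omega)
        omega
      obtain ⟨j, heq, hlo, hhi⟩ := ihf (f * (i+1)) (i+1) _ _ (((f * (i + 1) : Nat) : Int) :: ws) hfuel' hfac' h
      refine ⟨j + 1, ?_, ?_, ?_⟩
      · rw [heq, hfac', List.append_cons, desc_absorb]
      · rw [show i + (j + 1) = i + 1 + j from by omega]; exact hlo
      · rw [show i + (j + 1) + 1 = i + 1 + j + 1 from by omega]; exact hhi
    · rw [dif_neg h]
      refine ⟨0, by simp [desc], by simpa [hfac] using hle, ?_⟩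
      have : Nat.factorial (i + 0 + 1) = f * (i + 1) := by
        rw [hfac, Nat.factorial_succ]; ring_nf
      rw [this]
      omega

-- B's digit loop over the factorial list is the padded big-endian string
lemma bDigits_factL (m : Nat) : ∀ (d : Nat), bDigits (factL m) (d : Int) = padU 0 m d := by
  induction m with
  | zero => intro d; rfl
  | succ m ih =>
    intro d
    show PySem.Int.toStr (PySem.Int.floordiv (d : Int) ((Nat.factorial (m+1) : Nat) : Int)) ++
        bDigits (factL m) (PySem.Int.mod (d : Int) ((Nat.factorial (m+1) : Nat) : Int)) = _
    rw [PySem.Int.floordiv_natCast, PySem.Int.mod_natCast, ih]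
    show _ = PySem.Int.toStr ((d / sprodN 0 m : Nat) : Int) ++ padU 0 m (d % sprodN 0 m)
    rw [sprodN_zero_eq]

-- ===== VERDICT (by name: the statement is the Claim_ definition above) =====
theorem decimal_to_factoradic_spec : Claim_equal_decimal_to_factoradic := by
  intro decimal _
  unfold Spec_decimal_to_factoradic decimal_to_factoradic decimal_to_factoradic_alt
  rcases lt_trichotomy decimal 0 with hneg | hzero | hpos
  · rw [if_neg (by simp; omega), if_neg (by simp; omega), if_pos hneg]
    rw [aLoop]
    simp [not_lt.mpr (le_of_lt hneg)]
  · subst hzero; rfl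
  · rw [if_neg (by simp; omega), if_neg (by simp; omega), if_neg (by omega)]
    obtain ⟨n, rfl⟩ : ∃ n : Nat, decimal = (n : Int) := ⟨decimal.toNat, by omega⟩
    have hn : 1 ≤ n := by exact_mod_cast hpos
    obtain ⟨j, heq, hlo, hhi⟩ := bBuild_spec (n : Int) ((n:Int).toNat - 1) 1 1 (le_refl 1) (le_refl 1)
      [((1 : Nat) : Int)] (le_refl _) (by simp [Nat.factorial]) (by exact_mod_cast hn)
    rw [heq, desc_one_append, bDigits_factL]
    have hlo' : sprodN 0 j ≤ n := by
      rw [sprodN_zero_eq]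
      have : Nat.factorial (1 + j) ≤ n := by exact_mod_cast hlo
      simpa [Nat.add_comm] using this
    have hhi' : n < sprodN 0 (j+1) := by
      rw [sprodN_zero_eq]
      have : n < Nat.factorial (1 + j + 1) := by exact_mod_cast hhi
      have e : 1 + j + 1 = j + 2 := by omega
      rwa [e] at this
    rw [aLoop_eq_padL j 0 n "" hlo' hhi']
    rw [padL_eq_padU (j+1) 0 n hhi']
    simp
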